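-- pv_equiv track=rewrite | github.com/Megacinder/mds24 | md1_python_basic/assignment4.py | n4_grammys_award
-- ===== SOURCE A (Python) =====
-- def n4_grammys_award(li: list) -> str:
--     di = {}
--     for i in li:
--         if i not in di:
--             di[i] = 1
--         else:
--             di[i] += 1
--
--     di = {k: v for k, v in sorted(di.items(), key=lambda i: (i[1], i[0]))}
--
--     o_li = []
--     for k, v in di.items():
--         o_li.append(f"{k}: {v}")
--
--     o_li = [o_li[-1], o_li[0]]
--
--     return '\n'.join(o_li)
-- ===== SOURCE B (Python) =====
-- def n4_grammys_award(li: list) -> str: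
--     counts = {}
--     for x in li:
--         counts[x] = counts.get(x, 0) + 1
--     hi = lo = None
--     for k, v in counts.items():
--         if hi is None or (v, k) > (hi[1], hi[0]):
--             hi = (k, v)
--         if lo is None or (v, k) < (lo[1], lo[0]):
--             lo = (k, v)
--     return f"{hi[0]}: {hi[1]}\n{lo[0]}: {lo[1]}"
-- ===== Notes on version B (the rewrite author's own statement) =====
-- stated objective: alternative
-- what changed: Replaced A's sort of the counted items (plus the dict re-insertion and the loop formatting every entry) by a single linear scan over the counter items that keeps the running (count, value)-argmax and -argmin and formats only those two.
-- outside the precondition, e.g. on n4_grammys_award([]): A raises IndexError, B raises TypeError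
import Mathlib
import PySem

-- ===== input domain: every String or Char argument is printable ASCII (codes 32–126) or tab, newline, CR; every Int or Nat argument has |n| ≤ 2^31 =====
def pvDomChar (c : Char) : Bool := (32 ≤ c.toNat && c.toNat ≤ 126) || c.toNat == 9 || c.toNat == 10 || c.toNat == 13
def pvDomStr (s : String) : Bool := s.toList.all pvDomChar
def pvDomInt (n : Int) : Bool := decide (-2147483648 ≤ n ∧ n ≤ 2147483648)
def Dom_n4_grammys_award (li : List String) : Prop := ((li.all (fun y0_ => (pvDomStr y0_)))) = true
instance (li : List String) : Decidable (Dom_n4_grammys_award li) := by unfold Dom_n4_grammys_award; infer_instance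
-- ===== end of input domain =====

-- B replaces A's sort of the counted items (plus dict re-insertion and format-every-entry loop)
-- by a single linear scan keeping the running (count, value)-argmax and -argmin (objective: alternative).

-- ===== PORT A =====
def n4_grammys_award (li : List String) : String :=
  let di : PySem.Dict String Int :=
    li.foldl (fun d i =>
      if d.contains i = false then d.insert i 1 else d.modify i 0 (· + 1))
      PySem.Dict.empty
  let di2 : PySem.Dict String Int :=
    PySem.Dict.ofList (PySem.List.sorted2 di.items (fun p => p.2) (fun p => p.1))
  let o_li : List String :=
    di2.items.foldl (fun acc p => acc ++ [p.1 ++ ": " ++ PySem.Int.toStr p.2]) []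
  match PySem.List.pyGet? o_li (-1), PySem.List.pyGet? o_li 0 with
  | some a, some b => PySem.Str.join "\n" [a, b]
  | _, _ => ""  -- IndexError on empty input; excluded by Pre_

-- ===== PORT B =====
def n4_grammys_award_alt (li : List String) : String :=
  let counts : PySem.Dict String Int :=
    li.foldl (fun d x => d.insert x (d.getD x 0 + 1)) PySem.Dict.empty
  let st :=
    counts.items.foldl
      (fun (st : Option (String × Int) × Option (String × Int)) p =>
        ((match st.1 with
          | none => some p
          | some q => if toLex (q.2, q.1) < toLex (p.2, p.1) then some p else some q),
         (match st.2 with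
          | none => some p
          | some q => if toLex (p.2, p.1) < toLex (q.2, q.1) then some p else some q)))
      (none, none)
  match st.1 with
  | none => ""  -- hi stays None on empty input (TypeError in Python); excluded by Pre_
  | some hi =>
    match st.2 with
    | none => ""
    | some lo =>
        hi.1 ++ ": " ++ PySem.Int.toStr hi.2 ++ "\n" ++ lo.1 ++ ": " ++ PySem.Int.toStr lo.2

-- ===== PRECONDITION & SPEC =====
-- A raises IndexError (o_li[-1] on the empty list) exactly when li = []; B raises there too (TypeError).
def Pre_n4_grammys_award (li : List String) : Prop := li ≠ []
instance (li : List String) : Decidable (Pre_n4_grammys_award li) := by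
  unfold Pre_n4_grammys_award; infer_instance
def pvWitness_n4_grammys_award : List String := ["a", "b", "a"]

def Spec_n4_grammys_award (li : List String) (out : String) : Prop := out = n4_grammys_award_alt li
instance (li : List String) (out : String) : Decidable (Spec_n4_grammys_award li out) := by
  unfold Spec_n4_grammys_award; infer_instance

-- ===== CLAIM (what is proved, stated in full; the proofs are below) =====
def Claim_equal_n4_grammys_award : Prop :=
  ∀ (li : List String), Dom_n4_grammys_award li → Pre_n4_grammys_award li →
    Spec_n4_grammys_award li (n4_grammys_award li)

-- ===== LEMMAS AND PROOFS =====

-- the (count, value) key on a counter item, as Python's tuple comparison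
def pvK (p : String × Int) : Int ×ₗ String := toLex (p.2, p.1)

theorem pvK_inj : Function.Injective pvK := by
  intro a b h
  have h1 := congrArg (fun p : Int ×ₗ String => (ofLex p).1) h
  have h2 := congrArg (fun p : Int ×ₗ String => (ofLex p).2) h
  simp [pvK] at h1 h2
  exact Prod.ext h2 h1

-- B's two accumulator updates
def pvStepH (o : Option (String × Int)) (p : String × Int) : Option (String × Int) :=
  match o with
  | none => some p
  | some q => if toLex (q.2, q.1) < toLex (p.2, p.1) then some p else some q

def pvStepL (o : Option (String × Int)) (p : String × Int) : Option (String × Int) :=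
  match o with
  | none => some p
  | some q => if toLex (p.2, p.1) < toLex (q.2, q.1) then some p else some q

theorem pv_foldH_max : ∀ (xs : List (String × Int)) (q : String × Int),
    ∃ m, xs.foldl pvStepH (some q) = some m ∧ m ∈ q :: xs ∧ ∀ x ∈ q :: xs, pvK x ≤ pvK m := by
  intro xs
  induction xs with
  | nil => exact fun q => ⟨q, rfl, by simp, by simp⟩
  | cons y t ih =>
    intro q
    have hstep : pvStepH (some q) y = if pvK q < pvK y then some y else some q := rfl
    by_cases h : pvK q < pvK y
    · obtain ⟨m, hm, hmem, hmax⟩ := ih y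
      refine ⟨m, ?_, ?_, ?_⟩
      · rw [List.foldl_cons, hstep, if_pos h]; exact hm
      · rcases List.mem_cons.mp hmem with h' | h' <;> simp [h']
      · intro x hx
        rcases List.mem_cons.mp hx with h' | hx'
        · exact le_of_lt (lt_of_lt_of_le (h' ▸ h) (hmax y (List.mem_cons_self)))
        · exact hmax x hx'
    · obtain ⟨m, hm, hmem, hmax⟩ := ih q
      refine ⟨m, ?_, ?_, ?_⟩
      · rw [List.foldl_cons, hstep, if_neg h]; exact hm
      · rcases List.mem_cons.mp hmem with h' | h' <;> simp [h']
      · intro x hx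
        rcases List.mem_cons.mp hx with h' | hx'
        · exact hmax x (h' ▸ List.mem_cons_self)
        · rcases List.mem_cons.mp hx' with h' | h'
          · exact le_trans (h' ▸ le_of_not_gt h) (hmax q (List.mem_cons_self))
          · exact hmax x (List.mem_cons_of_mem q h')

theorem pv_foldL_min : ∀ (xs : List (String × Int)) (q : String × Int),
    ∃ m, xs.foldl pvStepL (some q) = some m ∧ m ∈ q :: xs ∧ ∀ x ∈ q :: xs, pvK m ≤ pvK x := by
  intro xs
  induction xs with
  | nil => exact fun q => ⟨q, rfl, by simp, by simp⟩
  | cons y t ih =>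
    intro q
    have hstep : pvStepL (some q) y = if pvK y < pvK q then some y else some q := rfl
    by_cases h : pvK y < pvK q
    · obtain ⟨m, hm, hmem, hmin⟩ := ih y
      refine ⟨m, ?_, ?_, ?_⟩
      · rw [List.foldl_cons, hstep, if_pos h]; exact hm
      · rcases List.mem_cons.mp hmem with h' | h' <;> simp [h']
      · intro x hx
        rcases List.mem_cons.mp hx with h' | hx'
        · exact le_of_lt (lt_of_le_of_lt (hmin y (List.mem_cons_self)) (h' ▸ h))
        · exact hmin x hx'
    · obtain ⟨m, hm, hmem, hmin⟩ := ih q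
      refine ⟨m, ?_, ?_, ?_⟩
      · rw [List.foldl_cons, hstep, if_neg h]; exact hm
      · rcases List.mem_cons.mp hmem with h' | h' <;> simp [h']
      · intro x hx
        rcases List.mem_cons.mp hx with h' | hx'
        · exact hmin x (h' ▸ List.mem_cons_self)
        · rcases List.mem_cons.mp hx' with h' | h'
          · exact le_trans (hmin q (List.mem_cons_self)) (h' ▸ le_of_not_gt h)
          · exact hmin x (List.mem_cons_of_mem q h')

-- strictly pairwise-increasing keys: the last element is the maximum …
theorem pv_pairwise_getLast? : ∀ (l : List (String × Int)),
    l.Pairwise (fun a b => pvK a < pvK b) → ∀ m, l.getLast? = some m →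
    ∀ x ∈ l, pvK x ≤ pvK m := by
  intro l
  induction l with
  | nil => intro _ m hm; simp at hm
  | cons y t ih =>
    intro hp m hm x hx
    rcases List.pairwise_cons.mp hp with ⟨hy, ht⟩
    cases t with
    | nil =>
      simp at hm hx
      simp [hx, hm]
    | cons z t' =>
      rw [List.getLast?_cons_cons] at hm
      rcases List.mem_cons.mp hx with h' | hx'
      · exact h' ▸ le_of_lt (hy m (List.mem_of_getLast? hm))
      · exact ih ht m hm x hx'

-- … and the head is the minimum
theorem pv_pairwise_head : ∀ (y : String × Int) (t : List (String × Int)),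
    (y :: t).Pairwise (fun a b => pvK a < pvK b) → ∀ x ∈ y :: t, pvK y ≤ pvK x := by
  intro y t hp x hx
  rcases List.pairwise_cons.mp hp with ⟨hy, _⟩
  rcases List.mem_cons.mp hx with h' | hx'
  · exact h' ▸ le_refl _
  · exact le_of_lt (hy x hx')

-- sorted2 with two linearly ordered keys is sorted with the lexicographic key
theorem pv_sorted2_eq_sorted_lex {α : Type} (xs : List α) (k1 : α → Int) (k2 : α → String) :
    PySem.List.sorted2 xs k1 k2 false
      = PySem.List.sorted xs (fun x => toLex (k1 x, k2 x)) false := by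
  unfold PySem.List.sorted2 PySem.List.sorted
  simp only [if_neg (by simp : ¬ (false = true))]
  have hb : (fun a b => decide (k1 a < k1 b) || (!decide (k1 b < k1 a) && decide (k2 a < k2 b)))
      = fun a b => decide ((toLex (k1 a, k2 a) : Int ×ₗ String) < toLex (k1 b, k2 b)) := by
    funext a b
    rcases lt_trichotomy (k1 a) (k1 b) with h | h | h
    · simp [Prod.Lex.lt_iff, h]
    · simp [Prod.Lex.lt_iff, h]
    · have h1 : ¬ k1 a < k1 b := lt_asymm h
      have h2 : k1 a ≠ k1 b := ne_of_gt h
      simp [Prod.Lex.lt_iff, h, h1, h2]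
  rw [hb]

theorem pv_key_inj (li : List String) :
    Function.Injective (fun x : String => (toLex (((List.count x li : Nat) : Int), x) : Int ×ₗ String)) := by
  intro a b h
  have := congrArg (fun p : Int ×ₗ String => (ofLex p).2) h
  simpa using this

-- ===== VERDICT (by name: the statement is the Claim_ definition above) =====
theorem n4_grammys_award_spec : Claim_equal_n4_grammys_award := by
  intro li _ hpre
  unfold Spec_n4_grammys_award n4_grammys_award n4_grammys_award_alt
  dsimp only
  set key : String → Int ×ₗ String := fun x => toLex (((List.count x li : Nat) : Int), x) with hkey
  set f : String → String × Int := fun k => (k, ((List.count k li : Nat) : Int)) with hf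
  set s : List String := PySem.Set.ofList li with hs
  -- A's counting loop is Counter(li)
  have hd : li.foldl (fun d i =>
      if d.contains i = false then d.insert i 1 else d.modify i 0 (· + 1))
      PySem.Dict.empty = PySem.Dict.counter li := by
    rw [PySem.Dict.counter_eq_foldl]
    apply PySem.List.foldl_congr_mem
    intro d i _
    by_cases h : d.contains i
    · simp [h]
    · have h' : d.contains i = false := by simpa using h
      simp [h', PySem.Dict.modify, PySem.Dict.getD_of_not_contains d 0 h']
  rw [hd, PySem.Dict.items_counter]
  -- B's counting loop is Counter(li) too
  rw [PySem.Dict.foldl_insert_getD_add_one_eq_counter, PySem.Dict.items_counter]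
  -- the sorted list of distinct elements
  set keyB : List String := PySem.List.sorted s key false with hkeyB
  have hnds : s.Nodup := PySem.Set.nodup_ofList li
  have hndB : keyB.Nodup := (PySem.List.sorted_perm s key false).symm.nodup hnds
  have hpwB : keyB.Pairwise (fun a b => key a < key b) := by
    have h1 : keyB.Pairwise (fun a b => key a ≤ key b) := PySem.List.sorted_pairwise s key
    have := List.Pairwise.and h1 hndB
    exact this.imp (fun h => lt_of_le_of_ne h.1 (fun he => h.2 (pv_key_inj li he)))
  -- A's sorted items = keyB.map f
  have hA : PySem.List.sorted2 (s.map f) (fun p => p.2) (fun p => p.1) false = keyB.map f := by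
    rw [pv_sorted2_eq_sorted_lex]
    apply PySem.List.sorted_eq_of_perm_of_pairwise_lt
    · exact ((PySem.List.sorted_perm s key false).map f)
    · rw [List.pairwise_map]
      exact hpwB
  rw [hA]
  -- the re-inserted dict's items are exactly the sorted pairs
  have hitems : (PySem.Dict.ofList (keyB.map f)).items = keyB.map f := by
    show (List.foldl (fun acc p => acc.insert p.1 p.2) PySem.Dict.empty (keyB.map f)).items
        = keyB.map f
    rw [PySem.Dict.items_foldl_insert_fresh (keyB.map f) Prod.fst Prod.snd PySem.Dict.empty
        (by intro a _; simp) (by simpa [List.map_map, hf, Function.comp_def] using hndB)]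
    simp [Function.comp_def, PySem.Dict.empty]
  rw [hitems]
  -- A's formatting loop is a map
  rw [PySem.List.foldl_append_singleton_eq_map (fun p : String × Int => p.1 ++ ": " ++ PySem.Int.toStr p.2)]
  rw [List.nil_append, List.map_map]
  -- keyB is nonempty
  have hBne : keyB ≠ [] := by
    rw [hkeyB, Ne, PySem.List.sorted_eq_nil_iff]
    intro h0
    rcases List.exists_mem_of_ne_nil li hpre with ⟨x, hx⟩
    have : x ∈ s := (PySem.Set.mem_ofList li x).mpr hx
    simp [h0] at this
  -- pairwise-increasing keys on keyB.map f under pvK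
  have hKf : ∀ x : String, pvK (f x) = key x := by intro x; rfl
  have hpwF : (keyB.map f).Pairwise (fun a b => pvK a < pvK b) := by
    rw [List.pairwise_map]
    exact hpwB.imp (fun {a b} h => by rw [hKf, hKf]; exact h)
  -- extremes of A's sorted list
  obtain ⟨hi, hhi⟩ : ∃ hi, keyB.getLast? = some hi := by
    cases h : keyB.getLast? with
    | none => exact absurd (List.getLast?_eq_none_iff.mp h) hBne
    | some v => exact ⟨v, rfl⟩
  obtain ⟨lo, hlo⟩ : ∃ lo, keyB[0]? = some lo := by
    cases h : keyB[0]? with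
    | none => exact absurd (by simpa using h) hBne
    | some v => exact ⟨v, rfl⟩
  -- B's scan over a permutation of keyB.map f
  have hperm : (keyB.map f).Perm (s.map f) := (PySem.List.sorted_perm s key false).map f
  -- split B's single loop into the two accumulator loops
  have hsplit : (s.map f).foldl
      (fun (st : Option (String × Int) × Option (String × Int)) p =>
        ((match st.1 with
          | none => some p
          | some q => if toLex (q.2, q.1) < toLex (p.2, p.1) then some p else some q),
         (match st.2 with
          | none => some p
          | some q => if toLex (p.2, p.1) < toLex (q.2, q.1) then some p else some q)))
      (none, none)
      = ((s.map f).foldl pvStepH none, (s.map f).foldl pvStepL none) := by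
    exact PySem.List.foldl_prod_mk pvStepH pvStepL (s.map f) none none
  rw [hsplit]
  -- s.map f is nonempty
  obtain ⟨y, t, hyt⟩ : ∃ y t, s.map f = y :: t := by
    cases h : s.map f with
    | nil =>
      exfalso
      have : keyB.map f = [] := (h ▸ hperm).eq_nil
      simp [List.map_eq_nil_iff] at this
      exact hBne this
    | cons y t => exact ⟨y, t, rfl⟩
  rw [hyt, List.foldl_cons, List.foldl_cons]
  have hsH : pvStepH none y = some y := rfl
  have hsL : pvStepL none y = some y := rfl
  rw [hsH, hsL]
  obtain ⟨mh, hmh, hmemh, hmaxh⟩ := pv_foldH_max t y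
  obtain ⟨ml, hml, hmeml, hminl⟩ := pv_foldL_min t y
  rw [hmh, hml]
  -- identify mh with f hi (the last of keyB) and ml with f lo (the head of keyB)
  have hfhi : (keyB.map f).getLast? = some (f hi) := by
    rw [List.getLast?_map, hhi]; rfl
  have hfhi_mem : f hi ∈ keyB.map f := List.mem_of_getLast? hfhi
  have hflo_mem : f lo ∈ keyB.map f := by
    have : lo ∈ keyB := List.mem_of_getElem? hlo
    exact List.mem_map_of_mem this
  -- keyB.map f starts with f lo
  obtain ⟨kt, hkcons⟩ : ∃ kt, keyB.map f = f lo :: kt := by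
    cases hk : keyB with
    | nil => exact absurd hk hBne
    | cons a b =>
      have : a = lo := by
        rw [hk] at hlo; simpa using hlo
      exact ⟨b.map f, by simp [this]⟩
  have hmemh' : mh ∈ keyB.map f := hperm.symm.mem_iff.mp (by rw [hyt]; exact hmemh)
  have hmeml' : ml ∈ keyB.map f := hperm.symm.mem_iff.mp (by rw [hyt]; exact hmeml)
  have hfhi_yt : f hi ∈ y :: t := by rw [← hyt]; exact hperm.mem_iff.mp hfhi_mem
  have hflo_yt : f lo ∈ y :: t := by rw [← hyt]; exact hperm.mem_iff.mp hflo_mem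
  have hmh_eq : mh = f hi := by
    apply pvK_inj
    apply le_antisymm
    · exact pv_pairwise_getLast? (keyB.map f) hpwF (f hi) hfhi mh hmemh'
    · exact hmaxh (f hi) hfhi_yt
  have hml_eq : ml = f lo := by
    apply pvK_inj
    apply le_antisymm
    · exact hminl (f lo) hflo_yt
    · rw [hkcons] at hpwF hmeml'
      exact pv_pairwise_head (f lo) kt hpwF ml hmeml'
  rw [hmh_eq, hml_eq]
  -- final string equality
  rw [PySem.List.pyGet?_neg_one, PySem.List.pyGet?_zero, List.getLast?_map, List.getElem?_map,
      hhi, hlo]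
  simp only [Option.map_some, Function.comp_def, hf]
  rw [← String.toList_inj]
  simp [PySem.Str.join, PySem.Chars.join, List.intercalate]
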